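-- pv_equiv track=rewrite | github.com/thisisshub/HacktoberFest | python/En19cs306027_Lovesh_Kumrawat_increment_binary_number.py | binary_incr
-- ===== SOURCE A (Python) =====
-- def binary_incr(base,incr):			# (base: Binary, incr: Decimal)
-- 	i=1
-- 	lst=list(str(base))
-- 	while incr!=0:
-- 		try:
-- 			temp=int((int(lst[-i])+incr)%2)
-- 		except:
-- 			lst.insert(0,0)
-- 			temp=int((int(lst[-i])+incr)%2)
-- 		incr=int((int(lst[-i])+incr)/2)
-- 		lst[-i]=str(temp)
-- 		i+=1
-- 	return int(str().join(lst))			#* 'int()' for Output restrict starting '0'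
-- ===== SOURCE B (Python) =====
-- def binary_incr(base, incr):
--     # Arithmetic re-implementation, no digit list: the carry starting at incr can
--     # only reach the low block of decimal digits whose binary value together with
--     # incr still needs the next power of two; collect that block as a binary value,
--     # add incr, re-encode its bits as decimal digits, and reattach the untouched
--     # high digits.
--     low, p2, p10, rest = 0, 1, 1, base
--     while incr + low >= p2:
--         low += (rest % 10) * p2
--         rest //= 10
--         p2 *= 2
--         p10 *= 10
--     n = low + incr
--     out = 0
--     q = 1
--     while n:
--         out += (n % 2) * q
--         q *= 10
--         n //= 2
--     return rest * p10 + out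
-- ===== Notes on version B (the rewrite author's own statement) =====
-- stated objective: alternative
-- what changed: Replaces A's in-place digit-list carry loop (negative indexing, try/except front-insertion, float division per digit) by pure integer arithmetic: one loop accumulates the binary value of the low digit block the carry reaches, the sum is then re-encoded bits-to-decimal-digits; no list, no exceptions, no string join.
-- outside the precondition, e.g. on binary_incr(10, -1): A returns 11, B does not finish within the time limit; on binary_incr(-10, 1): A returns -11, B returns -9; on binary_incr(-5, 1): A raises ValueError, B does not finish within the time limit
import Mathlib
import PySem

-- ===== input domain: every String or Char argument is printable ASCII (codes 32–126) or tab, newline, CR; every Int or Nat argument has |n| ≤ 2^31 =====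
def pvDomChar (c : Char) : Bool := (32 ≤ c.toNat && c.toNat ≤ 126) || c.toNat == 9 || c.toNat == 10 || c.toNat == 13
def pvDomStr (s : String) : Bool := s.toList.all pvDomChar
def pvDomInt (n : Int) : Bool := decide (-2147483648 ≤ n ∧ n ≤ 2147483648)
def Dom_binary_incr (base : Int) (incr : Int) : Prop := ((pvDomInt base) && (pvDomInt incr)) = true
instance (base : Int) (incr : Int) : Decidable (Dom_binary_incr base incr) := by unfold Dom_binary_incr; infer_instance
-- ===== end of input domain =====

-- B replaces A's in-place digit-list carry loop by pure integer arithmetic (carry-span scan + bits-to-decimal re-encoding); objective: alternative, same cost.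

-- ===== PORT A =====
-- list(str(base)) for base ≥ 0, each digit character modeled by its integer value
-- (exact on Pre_, where base ≥ 0 so str(base) is just the decimal digits).
def pvDigitsA (b : Int) : List Int :=
  if b.toNat = 0 then [0] else (Nat.digits 10 b.toNat).reverse.map (fun (d : Nat) => (d : Int))

-- the while-loop of A, state (i, lst, incr); fuel only makes it total (within Pre_
-- the loop always stops before the fuel runs out, see binary_incr_spec).
-- int((x)/2) is float division then truncation: exact = PySem.Int.truncdiv on |x| < 2^53,
-- which holds throughout on Dom inputs satisfying Pre_.
def pvALoop : Nat → Nat → List Int → Int → List Int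
  | 0, _, lst, _ => lst
  | fuel + 1, i, lst, incr =>
    if incr = 0 then lst
    else
      -- try: lst[-i]  /  except: lst.insert(0, 0)
      let lst' := if i ≤ lst.length then lst else 0 :: lst
      let d := lst'.getD (lst'.length - i) 0       -- int(lst[-i]) (in range after the insert)
      let temp := PySem.Int.mod (d + incr) 2       -- int((int(lst[-i])+incr)%2)
      let incr' := PySem.Int.truncdiv (d + incr) 2 -- int((int(lst[-i])+incr)/2)
      pvALoop fuel (i + 1) (lst'.set (lst'.length - i) temp) incr'

def binary_incr (base : Int) (incr : Int) : Int :=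
  let lst := pvDigitsA base
  let res := pvALoop (incr.natAbs + lst.length + 64) 1 lst incr
  res.foldl (fun acc d => 10 * acc + d) 0          -- int(str().join(lst))

-- ===== PORT B =====
-- Source B's first while loop, state (low, p2, p10, rest); fuel only makes it total
-- (within Pre_ ∩ Dom the loop needs at most 11 rounds before rest = 0, after which
-- the returned triple no longer changes, see binary_incr_spec).
def pvBLoop : Nat → Int → Int → Int → Int → Int → Int × Int × Int
  | 0, low, _, p10, rest, _ => (low, p10, rest)
  | fuel + 1, low, p2, p10, rest, incr =>
    if p2 ≤ incr + low then        -- while incr + low >= p2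
      pvBLoop fuel (low + PySem.Int.mod rest 10 * p2) (2 * p2) (10 * p10)
        (PySem.Int.floordiv rest 10) incr
    else (low, p10, rest)

-- Source B's second while loop, state (n, out, q); fuel only makes it total (≤ 36
-- rounds within Pre_ ∩ Dom, see binary_incr_spec).
def pvEncLoop : Nat → Int → Int → Int → Int
  | 0, _, out, _ => out
  | fuel + 1, n, out, q =>
    if n = 0 then out
    else pvEncLoop fuel (PySem.Int.floordiv n 2) (out + PySem.Int.mod n 2 * q) (10 * q)

def binary_incr_alt (base : Int) (incr : Int) : Int :=
  let r := pvBLoop 128 0 1 1 base incr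
  let n := r.1 + incr
  r.2.2 * r.2.1 + pvEncLoop 128 n 0 1

-- ===== PRECONDITION & SPEC =====
-- Pre_ keeps the function's natural domain: non-negative base and increment.  It
-- excludes negative base (A raises ValueError once the carry reaches the '-'
-- character, or returns an accidental sign-digit mix) and negative incr (a
-- decrement, outside the natural domain: A's float-truncation carry values there
-- are accidental, and B's encoding loop does not terminate on negative values).
def Pre_binary_incr (base : Int) (incr : Int) : Prop := 0 ≤ base ∧ 0 ≤ incr
instance (base : Int) (incr : Int) : Decidable (Pre_binary_incr base incr) := by
  unfold Pre_binary_incr; infer_instance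

def pvWitness_binary_incr : Int × Int := (101, 5)

def Spec_binary_incr (base : Int) (incr : Int) (out : Int) : Prop := out = binary_incr_alt base incr
instance (base : Int) (incr : Int) (out : Int) : Decidable (Spec_binary_incr base incr out) := by unfold Spec_binary_incr; infer_instance

-- ===== CLAIM (what is proved, stated in full; the proofs are below) =====
def Claim_equal_binary_incr : Prop := ∀ (base : Int) (incr : Int), Dom_binary_incr base incr → Pre_binary_incr base incr → Spec_binary_incr base incr (binary_incr base incr)

-- ===== LEMMAS AND PROOFS =====

-- decimal reading of a digit list, MSB first (= int(''.join(lst)))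
def pvDV (a : Int) (l : List Int) : Int := l.foldl (fun x d => 10 * x + d) a

-- the common abstract value: re-encode n with its bits as decimal digits
def pvToDec (n : Int) : Int :=
  if _h : n ≤ 0 then 0
  else n % 2 + 10 * pvToDec (n / 2)
termination_by n.toNat
decreasing_by omega

-- the common intermediate function both loops are proved against: process the
-- LSB-first digit list R with carry c
def pvG : List Int → Int → Int
  | [], c => pvToDec c
  | d :: R, c =>
    if c = 0 then pvDV 0 ((d :: R).reverse)
    else (d + c) % 2 + 10 * pvG R ((d + c) / 2)

-- the number a LSB-first digit list denotes in decimal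
def pvOfDigits : List Int → Int
  | [] => 0
  | d :: R => d + 10 * pvOfDigits R

theorem pvToDec_zero : pvToDec 0 = 0 := by rw [pvToDec]; simp

theorem pvToDec_pos (n : Int) (h : 0 < n) :
    pvToDec n = n % 2 + 10 * pvToDec (n / 2) := by
  rw [pvToDec, dif_neg (by omega)]

theorem pvToDec_bit (b : Int) (h0 : 0 ≤ b) (h1 : b ≤ 1) : pvToDec b = b := by
  interval_cases b
  · exact pvToDec_zero
  · rw [pvToDec_pos 1 (by omega)]
    norm_num [pvToDec_zero]

theorem pvDV_shift (l : List Int) : ∀ a : Int, pvDV a l = a * 10 ^ l.length + pvDV 0 l := by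
  induction l with
  | nil => intro a; simp [pvDV]
  | cons d t ih =>
    intro a
    show pvDV (10 * a + d) t = a * 10 ^ (t.length + 1) + pvDV (10 * 0 + d) t
    rw [ih (10 * a + d), ih (10 * 0 + d)]
    ring

theorem pvDV_concat (l : List Int) (d : Int) : pvDV 0 (l ++ [d]) = 10 * pvDV 0 l + d := by
  simp [pvDV, List.foldl_append]

theorem pvG_zero (R : List Int) : pvG R 0 = pvDV 0 R.reverse := by
  cases R with
  | nil => simpa [pvDV] using pvToDec_zero
  | cons d t => rw [pvG, if_pos rfl]

theorem pvGetD_append_len (Q : List Int) (d : Int) (S : List Int) :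
    (Q ++ d :: S).getD Q.length 0 = d := by
  induction Q with
  | nil => rfl
  | cons q t ih => simpa using ih

theorem pvSet_append_len (Q : List Int) (d v : Int) (S : List Int) :
    (Q ++ d :: S).set Q.length v = Q ++ v :: S := by
  induction Q with
  | nil => rfl
  | cons q t ih => simpa using ih

theorem pvTruncdiv_nonneg (x : Int) (hx : 0 ≤ x) :
    PySem.Int.truncdiv x 2 = x / 2 := by
  rw [PySem.Int.truncdiv, Int.tdiv_eq_ediv_of_nonneg hx]

-- bit-length facts used for the fuel bookkeeping
theorem pvBitLen_mono (a b : Int) (ha : 0 ≤ a) (hab : a ≤ b) :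
    PySem.Int.bitLength a ≤ PySem.Int.bitLength b := by
  by_cases ha0 : a = 0
  · simp [ha0, PySem.Int.bitLength_zero]
  · by_contra hlt
    have hba : PySem.Int.bitLength b < PySem.Int.bitLength a := Nat.lt_of_not_le hlt
    have h1 : 2 ^ (PySem.Int.bitLength a - 1) ≤ a.natAbs :=
      PySem.Int.two_pow_bitLength_le a ha0
    have h2 : b.natAbs < 2 ^ PySem.Int.bitLength b := PySem.Int.lt_two_pow_bitLength b
    have h3 : a.natAbs ≤ b.natAbs := by omega
    have h4 : 2 ^ PySem.Int.bitLength b ≤ 2 ^ (PySem.Int.bitLength a - 1) :=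
      Nat.pow_le_pow_right (by norm_num) (by omega)
    omega

theorem pvBitLen_le_natAbs (a : Int) : PySem.Int.bitLength a ≤ a.natAbs := by
  by_cases ha0 : a = 0
  · simp [ha0, PySem.Int.bitLength_zero]
  · have h1 : 2 ^ (PySem.Int.bitLength a - 1) ≤ a.natAbs :=
      PySem.Int.two_pow_bitLength_le a ha0
    have h2 : PySem.Int.bitLength a - 1 < 2 ^ (PySem.Int.bitLength a - 1) :=
      Nat.lt_two_pow_self
    omega

-- toDec splits over a bit-disjoint decomposition
theorem pvToDec_split : ∀ (j : Nat) (a b : Int), 0 ≤ a → a < 2 ^ j → 0 ≤ b →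
    pvToDec (a + b * 2 ^ j) = pvToDec a + pvToDec b * 10 ^ j := by
  intro j
  induction j with
  | zero =>
    intro a b ha haj hb
    have ha0 : a = 0 := by omega
    simp [ha0, pvToDec_zero]
  | succ j ih =>
    intro a b ha haj hb
    by_cases hx0 : a + b * 2 ^ (j + 1) = 0
    · have hM : (0:Int) < 2 ^ (j + 1) := by positivity
      have hbM : 0 ≤ b * 2 ^ (j + 1) := mul_nonneg hb (le_of_lt hM)
      have ha0 : a = 0 := by omega
      have hb0 : b = 0 := by
        rcases lt_or_ge 0 b with h | h
        · nlinarith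
        · omega
      simp [ha0, hb0, pvToDec_zero]
    · have hM : (0:Int) < 2 ^ (j + 1) := by positivity
      have hMj : (0:Int) < 2 ^ j := by positivity
      have hpow : (2:Int) ^ (j + 1) = 2 ^ j * 2 := by rw [pow_succ]
      have hbM : 0 ≤ b * 2 ^ (j + 1) := mul_nonneg hb (le_of_lt hM)
      have hxpos : 0 < a + b * 2 ^ (j + 1) := by omega
      rw [pvToDec_pos _ hxpos]
      have hmod : (a + b * 2 ^ (j + 1)) % 2 = a % 2 := by
        rw [hpow]
        have : a + b * (2 ^ j * 2) = a + (b * 2 ^ j) * 2 := by ring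
        rw [this, Int.add_mul_emod_self_right]
      have hdiv : (a + b * 2 ^ (j + 1)) / 2 = a / 2 + b * 2 ^ j := by
        rw [hpow]
        have : a + b * (2 ^ j * 2) = a + (b * 2 ^ j) * 2 := by ring
        rw [this, Int.add_mul_ediv_right _ _ (by norm_num : (2:Int) ≠ 0)]
      rw [hmod, hdiv, ih (a / 2) b (by omega) (by omega) hb]
      by_cases ha0 : a = 0
      · simp [ha0, pvToDec_zero]
        ring
      · rw [pvToDec_pos a (by omega)]
        ring

-- ========== A-side ==========

-- the carry-only tail of A's loop: all original digits consumed, zeros inserted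
theorem pvALoop_phase2 : ∀ (fuel : Nat) (S : List Int) (incr : Int),
    0 ≤ incr → PySem.Int.bitLength incr + 1 ≤ fuel →
    pvDV 0 (pvALoop fuel (S.length + 1) S incr)
      = pvToDec incr * 10 ^ S.length + pvDV 0 S := by
  intro fuel
  induction fuel with
  | zero => intro S incr _ hf; omega
  | succ f ih =>
    intro S incr hincr hf
    by_cases h0 : incr = 0
    · subst h0
      rw [pvALoop, if_pos rfl, pvToDec_zero]
      ring
    · rw [pvALoop]
      simp only [if_neg h0]
      have hgt : ¬ (S.length + 1 ≤ S.length) := by omega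
      simp only [hgt, if_false]
      have hlen : (0 :: S).length - (S.length + 1) = 0 := by simp
      rw [hlen]
      have hget : (0 :: S).getD 0 0 = (0 : Int) := rfl
      rw [hget]
      have hset : (0 :: S).set 0 (PySem.Int.mod (0 + incr) 2)
          = PySem.Int.mod (0 + incr) 2 :: S := rfl
      rw [hset]
      set temp := PySem.Int.mod (0 + incr) 2 with htemp
      set incr' := PySem.Int.truncdiv (0 + incr) 2 with hincr'
      have htd : incr' = incr / 2 := by
        rw [hincr', zero_add]; exact pvTruncdiv_nonneg incr hincr
      have htv : temp = incr % 2 := by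
        rw [htemp, zero_add, PySem.Int.mod_eq_emod_of_pos (by omega)]
      have hbl : PySem.Int.bitLength incr
          = PySem.Int.bitLength (PySem.Int.floordiv incr 2) + 1 :=
        PySem.Int.bitLength_of_pos (by omega)
      have hfd : PySem.Int.floordiv incr 2 = incr / 2 :=
        PySem.Int.floordiv_eq_ediv_of_pos (by norm_num)
      have hrec := ih (temp :: S) incr' (by rw [htd]; omega)
        (by rw [htd, ← hfd]; omega)
      simp only [List.length_cons] at hrec
      rw [hrec]
      have hS' : pvDV 0 (temp :: S) = temp * 10 ^ S.length + pvDV 0 S := by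
        show pvDV (10 * 0 + temp) S = _
        rw [pvDV_shift S (10 * 0 + temp)]; ring
      rw [hS']
      have hexp : pvToDec incr = temp + 10 * pvToDec incr' := by
        rw [pvToDec_pos incr (by omega), ← htd, ← htv]
      rw [hexp]
      ring

-- A's loop on prefix P (MSB first, digits 0..9) with already-final suffix S
theorem pvALoop_spec : ∀ (fuel : Nat) (P S : List Int) (incr : Int),
    (∀ d ∈ P, 0 ≤ d ∧ d ≤ 9) → 0 ≤ incr →
    P.length + max (PySem.Int.bitLength incr) 4 + 1 ≤ fuel →
    pvDV 0 (pvALoop fuel (S.length + 1) (P ++ S) incr)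
      = pvG P.reverse incr * 10 ^ S.length + pvDV 0 S := by
  intro fuel
  induction fuel with
  | zero => intro P S incr _ _ hf; omega
  | succ f ih =>
    intro P S incr hP hincr hf
    by_cases h0 : incr = 0
    · subst h0
      rw [pvALoop, if_pos rfl, pvG_zero, List.reverse_reverse]
      rw [pvDV, List.foldl_append, ← pvDV, ← pvDV, pvDV_shift S (pvDV 0 P)]
    · rcases P.eq_nil_or_concat with hPn | ⟨Q, d, hPQ⟩
      · subst hPn
        simp only [List.nil_append, List.reverse_nil]
        rw [pvG]
        exact pvALoop_phase2 (f + 1) S incr hincr (by omega)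
      · subst hPQ
        rw [List.concat_eq_append] at hP hf ⊢
        rw [pvALoop]
        simp only [if_neg h0]
        have hle : S.length + 1 ≤ ((Q ++ [d]) ++ S).length := by simp
        rw [if_pos hle]
        have hlen : ((Q ++ [d]) ++ S).length - (S.length + 1) = Q.length := by
          simp
        rw [hlen]
        have hform : (Q ++ [d]) ++ S = Q ++ d :: S := by simp
        rw [hform, pvGetD_append_len, pvSet_append_len]
        set temp := PySem.Int.mod (d + incr) 2 with htemp
        set incr' := PySem.Int.truncdiv (d + incr) 2 with hincr'
        have hdbit := hP d (by simp)
        have hQdig : ∀ x ∈ Q, 0 ≤ x ∧ x ≤ 9 := fun x hx => hP x (by simp [hx])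
        have htd : incr' = (d + incr) / 2 := by
          rw [hincr']; exact pvTruncdiv_nonneg _ (by omega)
        have htv : temp = (d + incr) % 2 := by
          rw [htemp, PySem.Int.mod_eq_emod_of_pos (by omega)]
        have hinc' : 0 ≤ incr' := by rw [htd]; omega
        -- the carry never grows past max incr 8
        have hblen : max (PySem.Int.bitLength incr') 4
            ≤ max (PySem.Int.bitLength incr) 4 := by
          rcases le_or_gt incr 8 with hc | hc
          · have h8 : incr' ≤ 8 := by rw [htd]; omega
            have := pvBitLen_mono incr' 8 hinc' h8
            have h84 : PySem.Int.bitLength (8 : Int) = 4 := by decide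
            omega
          · have hle' : incr' ≤ incr := by rw [htd]; omega
            have := pvBitLen_mono incr' incr hinc' hle'
            omega
        have hrec := ih Q (temp :: S) incr' hQdig hinc'
          (by
            simp only [List.length_append, List.length_cons, List.length_nil] at hf ⊢
            omega)
        simp only [List.length_cons] at hrec
        have hQform : Q ++ temp :: S = Q ++ (temp :: S) := rfl
        rw [hQform, hrec]
        have hS' : pvDV 0 (temp :: S) = temp * 10 ^ S.length + pvDV 0 S := by
          show pvDV (10 * 0 + temp) S = _
          rw [pvDV_shift S (10 * 0 + temp)]; ring
        rw [hS', List.reverse_append, List.reverse_singleton]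
        have hexp : pvG (d :: Q.reverse) incr = temp + 10 * pvG Q.reverse incr' := by
          rw [pvG, if_neg h0, ← htv, htd]
        have hcons : ([d] ++ Q.reverse) = d :: Q.reverse := rfl
        rw [hcons, hexp]
        ring

-- ========== B-side ==========

theorem pvOfDigits_nonneg (R : List Int) (hR : ∀ d ∈ R, 0 ≤ d ∧ d ≤ 9) :
    0 ≤ pvOfDigits R := by
  induction R with
  | nil => simp [pvOfDigits]
  | cons d t ih =>
    have hd := hR d (by simp)
    have ht := ih (fun x hx => hR x (by simp [hx]))
    rw [pvOfDigits]
    omega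

theorem pvOfDigits_eq_dv (R : List Int) : pvOfDigits R = pvDV 0 R.reverse := by
  induction R with
  | nil => simp [pvOfDigits, pvDV]
  | cons d t ih =>
    rw [pvOfDigits, List.reverse_cons, pvDV_concat, ih]
    ring

-- once rest = 0 the loop changes nothing observable
theorem pvBLoop_zero_rest : ∀ (fuel : Nat) (low p2 p10 incr : Int),
    (pvBLoop fuel low p2 p10 0 incr).1 = low
      ∧ (pvBLoop fuel low p2 p10 0 incr).2.2 = 0 := by
  intro fuel
  induction fuel with
  | zero => intro low p2 p10 incr; exact ⟨rfl, rfl⟩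
  | succ f ih =>
    intro low p2 p10 incr
    rw [pvBLoop]
    by_cases hc : p2 ≤ incr + low
    · rw [if_pos hc]
      have hm : PySem.Int.mod 0 10 = 0 := by decide
      have hd : PySem.Int.floordiv 0 10 = 0 := by decide
      rw [hm, hd]
      have := ih (low + 0 * p2) (2 * p2) (10 * p10) incr
      simpa using this
    · rw [if_neg hc]
      exact ⟨rfl, rfl⟩

-- B's scan loop against pvG: at state j the loop has collected low = value of the
-- j low digits, and the digits still in rest are R
theorem pvBLoop_spec : ∀ (R : List Int) (fuel j : Nat) (low incr : Int),
    (∀ d ∈ R, 0 ≤ d ∧ d ≤ 9) → 0 ≤ incr → 0 ≤ low → R.length + 1 ≤ fuel →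
    ((pvBLoop fuel low (2 ^ j) (10 ^ j) (pvOfDigits R) incr).2.2
        * (pvBLoop fuel low (2 ^ j) (10 ^ j) (pvOfDigits R) incr).2.1
      + pvToDec ((pvBLoop fuel low (2 ^ j) (10 ^ j) (pvOfDigits R) incr).1 + incr)
      = pvToDec ((low + incr) % 2 ^ j)
        + pvG R ((low + incr) / 2 ^ j) * 10 ^ j)
    ∧ 0 ≤ (pvBLoop fuel low (2 ^ j) (10 ^ j) (pvOfDigits R) incr).1
    ∧ (pvBLoop fuel low (2 ^ j) (10 ^ j) (pvOfDigits R) incr).1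
        ≤ low + 9 * 2 ^ j * (2 ^ R.length - 1) := by
  intro R
  induction R with
  | nil =>
    intro fuel j low incr _ hincr hlow _
    have hz := pvBLoop_zero_rest fuel low (2 ^ j) (10 ^ j) incr
    have hofnil : pvOfDigits ([] : List Int) = 0 := rfl
    rw [hofnil] at *
    refine ⟨?_, by omega, by simp; omega⟩
    rw [hz.1, hz.2, pvG]
    have hMj : (0:Int) < 2 ^ j := by positivity
    have hsplit := pvToDec_split j ((low + incr) % 2 ^ j) ((low + incr) / 2 ^ j)
      (Int.emod_nonneg _ (by omega)) (Int.emod_lt_of_pos _ hMj)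
      (Int.ediv_nonneg (by omega) (by omega))
    rw [Int.emod_add_ediv_mul (low + incr) (2 ^ j)] at hsplit
    rw [hsplit]
    ring
  | cons d R' ih =>
    intro fuel j low incr hdig hincr hlow hfuel
    obtain ⟨f, rfl⟩ : ∃ f, fuel = f + 1 := ⟨fuel - 1, by omega⟩
    have hd := hdig d (by simp)
    have hR' : ∀ x ∈ R', 0 ≤ x ∧ x ≤ 9 := fun x hx => hdig x (by simp [hx])
    have ho' : 0 ≤ pvOfDigits R' := pvOfDigits_nonneg R' hR'
    have hMj : (0:Int) < 2 ^ j := by positivity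
    rw [pvBLoop]
    have hof : pvOfDigits (d :: R') = d + 10 * pvOfDigits R' := rfl
    by_cases hc : 2 ^ j ≤ incr + low
    · rw [if_pos hc]
      have hm : PySem.Int.mod (pvOfDigits (d :: R')) 10 = d := by
        rw [PySem.Int.mod_eq_emod_of_pos (by norm_num), hof]
        omega
      have hfd : PySem.Int.floordiv (pvOfDigits (d :: R')) 10 = pvOfDigits R' := by
        rw [PySem.Int.floordiv_eq_ediv_of_pos (by norm_num), hof]
        omega
      rw [hm, hfd]
      have h2 : 2 * (2:Int) ^ j = 2 ^ (j + 1) := by rw [pow_succ]; ring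
      have h10 : 10 * (10:Int) ^ j = 10 ^ (j + 1) := by rw [pow_succ]; ring
      rw [h2, h10]
      have hlow' : 0 ≤ low + d * 2 ^ j := by
        have := mul_nonneg hd.1 (le_of_lt hMj)
        omega
      have hrec := ih f (j + 1) (low + d * 2 ^ j) incr hR' hincr hlow'
        (by simp at hfuel ⊢; omega)
      refine ⟨?_, hrec.2.1, ?_⟩
      · rw [hrec.1]
        -- carry bookkeeping: c = (low+incr)/2^j ≠ 0 here
        set x := low + incr with hx
        have hcpos : 1 ≤ x / 2 ^ j := by
          rw [Int.le_ediv_iff_mul_le hMj]; omega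
        set c := x / 2 ^ j with hcdef
        set r := x % 2 ^ j with hrdef
        have hxr : x = 2 ^ j * c + r := (Int.mul_ediv_add_emod x (2 ^ j)).symm
        have hr0 : 0 ≤ r := Int.emod_nonneg _ (by omega)
        have hrM : r < 2 ^ j := Int.emod_lt_of_pos _ hMj
        -- rewrite the IH's x' = x + d * 2^j in terms of c and r
        have hexpand : (d + c) * 2 ^ j = d * 2 ^ j + 2 ^ j * c := by ring
        have hx' : low + d * 2 ^ j + incr = (d + c) * 2 ^ j + r := by
          rw [hexpand]; linarith [hxr, hx]
        have hs0 : (0:Int) ≤ (d + c) % 2 := by omega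
        have hs1 : (d + c) % 2 ≤ 1 := by omega
        have hsct : (d + c) = 2 * ((d + c) / 2) + (d + c) % 2 := by omega
        have ht0 : (0:Int) ≤ (d + c) / 2 := by omega
        have hkey : (d + c) * 2 ^ j + r
            = (r + ((d + c) % 2) * 2 ^ j) + ((d + c) / 2) * 2 ^ (j + 1) := by
          rw [pow_succ]
          linear_combination (2:Int) ^ j * hsct
        have hsM : ((d + c) % 2) * 2 ^ j ≤ 2 ^ j := by nlinarith
        have hsnn : (0:Int) ≤ ((d + c) % 2) * 2 ^ j := mul_nonneg hs0 (le_of_lt hMj)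
        have hlow2 : (0:Int) ≤ r + ((d + c) % 2) * 2 ^ j := by omega
        have hhi2 : r + ((d + c) % 2) * 2 ^ j < 2 ^ (j + 1) := by
          rw [pow_succ]; omega
        have hmod' : (low + d * 2 ^ j + incr) % 2 ^ (j + 1)
            = r + ((d + c) % 2) * 2 ^ j := by
          rw [hx', hkey, Int.add_mul_emod_self_right]
          exact Int.emod_eq_of_lt hlow2 hhi2
        have hdiv' : (low + d * 2 ^ j + incr) / 2 ^ (j + 1) = (d + c) / 2 := by
          rw [hx', hkey,
            Int.add_mul_ediv_right _ _ (by positivity : (0:Int) < 2 ^ (j + 1)).ne',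
            Int.ediv_eq_zero_of_lt hlow2 hhi2]
          omega
        rw [hmod', hdiv']
        have hGc : pvG (d :: R') c = (d + c) % 2 + 10 * pvG R' ((d + c) / 2) := by
          rw [pvG, if_neg (by omega)]
        rw [hGc]
        have hbit : pvToDec (r + ((d + c) % 2) * 2 ^ j)
            = pvToDec r + pvToDec ((d + c) % 2) * 10 ^ j :=
          pvToDec_split j r _ hr0 hrM hs0
        rw [hbit, pvToDec_bit ((d + c) % 2) hs0 hs1]
        ring
      · have hbnd := hrec.2.2
        have hda : d * 2 ^ j ≤ 9 * 2 ^ j := by nlinarith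
        have e1 : (2:Int) ^ (d :: R').length = 2 * 2 ^ R'.length := by
          rw [List.length_cons, pow_succ]; ring
        have e2 : (2:Int) ^ (j + 1) = 2 ^ j * 2 := by rw [pow_succ]
        calc (pvBLoop f (low + d * 2 ^ j) (2 ^ (j + 1)) (10 ^ (j + 1))
                (pvOfDigits R') incr).1
            ≤ low + d * 2 ^ j + 9 * 2 ^ (j + 1) * (2 ^ R'.length - 1) := hbnd
          _ ≤ low + 9 * 2 ^ j * (2 ^ (d :: R').length - 1) := by
              rw [e1, e2]; nlinarith [hda]
    · rw [if_neg hc]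
      have hB1 : (1:Int) ≤ 2 ^ (d :: R').length := by
        exact_mod_cast Nat.one_le_two_pow
      have hq : (0:Int) ≤ 9 * 2 ^ j * (2 ^ (d :: R').length - 1) := by
        nlinarith [hB1, hMj]
      refine ⟨?_, hlow, by linarith⟩
      show pvOfDigits (d :: R') * 10 ^ j + pvToDec (low + incr)
          = pvToDec ((low + incr) % 2 ^ j) + pvG (d :: R') ((low + incr) / 2 ^ j) * 10 ^ j
      have hcz : (low + incr) / 2 ^ j = 0 :=
        Int.ediv_eq_zero_of_lt (by omega) (by omega)
      have hmz : (low + incr) % 2 ^ j = low + incr :=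
        Int.emod_eq_of_lt (by omega) (by omega)
      rw [hcz, hmz, pvG, if_pos rfl, ← pvOfDigits_eq_dv]
      ring

-- encoding loop = pvToDec
theorem pvEncLoop_spec : ∀ (fuel : Nat) (n out q : Int), 0 ≤ n →
    PySem.Int.bitLength n + 1 ≤ fuel →
    pvEncLoop fuel n out q = out + pvToDec n * q := by
  intro fuel
  induction fuel with
  | zero => intro n out q _ hf; omega
  | succ f ih =>
    intro n out q hn hf
    rw [pvEncLoop]
    by_cases h0 : n = 0
    · rw [if_pos h0, h0, pvToDec_zero]; ring
    · rw [if_neg h0]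
      have hfd : PySem.Int.floordiv n 2 = n / 2 :=
        PySem.Int.floordiv_eq_ediv_of_pos (by norm_num)
      have hmd : PySem.Int.mod n 2 = n % 2 :=
        PySem.Int.mod_eq_emod_of_pos (by norm_num)
      have hbl : PySem.Int.bitLength n
          = PySem.Int.bitLength (PySem.Int.floordiv n 2) + 1 :=
        PySem.Int.bitLength_of_pos (by omega)
      rw [hfd, hmd, ih (n / 2) (out + n % 2 * q) (10 * q) (by omega)
        (by rw [hfd] at hbl; omega)]
      rw [pvToDec_pos n (by omega)]
      ring

-- digits of str(base) are decimal digits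
theorem pvDigitsA_digits (base : Int) : ∀ d ∈ pvDigitsA base, 0 ≤ d ∧ d ≤ 9 := by
  intro d hd
  by_cases h0 : base.toNat = 0
  · rw [pvDigitsA, if_pos h0] at hd
    simp at hd
    omega
  · rw [pvDigitsA, if_neg h0] at hd
    simp only [List.mem_map, List.mem_reverse] at hd
    obtain ⟨k, hk, hkd⟩ := hd
    have h9 := Nat.digits_lt_base (by norm_num : 1 < 10) hk
    omega

theorem pvOfDigits_digits (n : Nat) :
    pvOfDigits ((Nat.digits 10 n).map (fun (d : Nat) => (d : Int))) = n := by
  induction n using Nat.strong_induction_on with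
  | _ n ih =>
    by_cases h0 : n = 0
    · subst h0; simp [pvOfDigits]
    · rw [Nat.digits_def' (by norm_num : 1 < 10) (Nat.pos_of_ne_zero h0)]
      simp only [List.map_cons]
      rw [pvOfDigits, ih (n / 10) (Nat.div_lt_self (Nat.pos_of_ne_zero h0) (by norm_num))]
      push_cast
      omega

theorem pvOfDigitsA (base : Int) (hb : 0 ≤ base) :
    pvOfDigits ((pvDigitsA base).reverse) = base := by
  rw [pvDigitsA]
  by_cases h0 : base.toNat = 0
  · rw [if_pos h0]
    show (0 : Int) + 10 * pvOfDigits [] = base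
    show (0 : Int) + 10 * 0 = base
    omega
  · rw [if_neg h0, ← List.map_reverse, List.reverse_reverse, pvOfDigits_digits]
    omega

theorem binary_incr_spec : Claim_equal_binary_incr := by
  intro base incr hdom hpre
  obtain ⟨hb, hi⟩ := hpre
  have hdom' : base ≤ 2147483648 ∧ incr ≤ 2147483648 := by
    simp only [Dom_binary_incr, pvDomInt, Bool.and_eq_true, decide_eq_true_eq] at hdom
    exact ⟨hdom.1.2, hdom.2.2⟩
  set L := pvDigitsA base with hL
  have hdigL : ∀ d ∈ L, 0 ≤ d ∧ d ≤ 9 := pvDigitsA_digits base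
  have hdigR : ∀ d ∈ L.reverse, 0 ≤ d ∧ d ≤ 9 := fun d hd =>
    hdigL d (List.mem_reverse.mp hd)
  have hlen : L.length ≤ 10 := by
    rw [hL, pvDigitsA]
    by_cases h0 : base.toNat = 0
    · rw [if_pos h0]; norm_num
    · rw [if_neg h0]
      simp only [List.length_map, List.length_reverse]
      have h1 : base.toNat < 10 ^ 10 := by omega
      exact (Nat.digits_length_le_iff (by norm_num : 1 < 10) _).mpr h1
  -- A's value
  have hA : binary_incr base incr = pvG L.reverse incr := by
    show pvDV 0 (pvALoop (incr.natAbs + L.length + 64) 1 L incr) = pvG L.reverse incr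
    have hmain := pvALoop_spec (incr.natAbs + L.length + 64) L [] incr hdigL hi
      (by
        have := pvBitLen_le_natAbs incr
        omega)
    simp only [List.append_nil, List.length_nil, Nat.zero_add, pow_zero, mul_one] at hmain
    rw [hmain]
    show pvG L.reverse incr + pvDV 0 [] = pvG L.reverse incr
    show pvG L.reverse incr + 0 = pvG L.reverse incr
    omega
  -- B's value
  have hofd : pvOfDigits L.reverse = base := pvOfDigitsA base hb
  have hBL := pvBLoop_spec L.reverse 128 0 0 incr hdigR hi le_rfl
    (by rw [List.length_reverse]; omega)
  simp only [pow_zero, hofd] at hBL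
  set r := pvBLoop 128 0 1 1 base incr with hr
  have hBLeq := hBL.1
  simp only [zero_add, Int.emod_one, Int.ediv_one, mul_one, pvToDec_zero] at hBLeq
  have hr0 : 0 ≤ r.1 := hBL.2.1
  have hrB := hBL.2.2
  have hlenR : (2:Int) ^ L.reverse.length ≤ 2 ^ 10 := by
    apply pow_le_pow_right₀ (by norm_num : (1:Int) ≤ 2)
    rw [List.length_reverse]
    exact hlen
  have hr1 : r.1 + incr ≤ 4294967296 := by nlinarith [hrB, hlenR, hdom'.2]
  have h33 : PySem.Int.bitLength (4294967296 : Int) = 33 := by decide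
  have hmono := pvBitLen_mono (r.1 + incr) 4294967296 (by omega) hr1
  have henc := pvEncLoop_spec 128 (r.1 + incr) 0 1 (by omega) (by omega)
  show binary_incr base incr = binary_incr_alt base incr
  rw [hA]
  show pvG L.reverse incr = r.2.2 * r.2.1 + pvEncLoop 128 (r.1 + incr) 0 1
  rw [henc, ← hBLeq]
  ring
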